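-- pv_equiv track=rewrite | github.com/microTT/toto | memory/memory_system/hooks.py | _should_queue_summary
-- ===== SOURCE A (Python) =====
-- from typing import Any
--
-- def _should_queue_summary(delta_events: list[dict[str, Any]]) -> bool:
--     if not delta_events:
--         return False
--     event_count = len(delta_events)
--     char_count = sum(
--         len((row.get("user_message_delta") or "")) + len((row.get("assistant_message_delta") or ""))
--         for row in delta_events
--     )
--     combined = "\n".join(
--         filter(
--             None,
--             [row.get("user_message_delta", "") for row in delta_events]
--             + [row.get("assistant_message_delta", "") for row in delta_events],
--         )
--     ).lower()
--     explicit_terms = ("记住", "remember", "forget", "update memory", "更新记忆")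
--     inference_terms = ("决定", "偏好", "约束", "todo", "下次继续", "失败结论", "next step", "failed")
--     if any(term in combined for term in explicit_terms):
--         return True
--     if event_count >= 4:
--         return True
--     if char_count >= 1200:
--         return True
--     return any(term in combined for term in inference_terms)
-- ===== SOURCE B (Python) =====
-- def _should_queue_summary(delta_events: list[dict[str, object]]) -> bool:
--     if not delta_events:
--         return False
--     explicit_terms = ("记住", "remember", "forget", "update memory", "更新记忆")
--     inference_terms = ("决定", "偏好", "约束", "todo", "下次继续", "失败结论", "next step", "failed")
--     char_count = 0
--     has_explicit = False
--     has_inference = False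
--     for row in delta_events:
--         u = row.get("user_message_delta") or ""
--         a = row.get("assistant_message_delta") or ""
--         char_count += len(u) + len(a)
--         ul = u.lower()
--         al = a.lower()
--         has_explicit = has_explicit or any(t in ul or t in al for t in explicit_terms)
--         has_inference = has_inference or any(t in ul or t in al for t in inference_terms)
--     return has_explicit or len(delta_events) >= 4 or char_count >= 1200 or has_inference
-- ===== Notes on version B (the rewrite author's own statement) =====
-- stated objective: alternative
-- what changed: Replaces the three list comprehensions plus join-then-lower-then-substring-scan over one combined string by a single fold over delta_events that accumulates the character count and two per-row term-hit flags, never materialising the combined string; it trades A's C-level bulk string passes for one explicit loop.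
import Mathlib
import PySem

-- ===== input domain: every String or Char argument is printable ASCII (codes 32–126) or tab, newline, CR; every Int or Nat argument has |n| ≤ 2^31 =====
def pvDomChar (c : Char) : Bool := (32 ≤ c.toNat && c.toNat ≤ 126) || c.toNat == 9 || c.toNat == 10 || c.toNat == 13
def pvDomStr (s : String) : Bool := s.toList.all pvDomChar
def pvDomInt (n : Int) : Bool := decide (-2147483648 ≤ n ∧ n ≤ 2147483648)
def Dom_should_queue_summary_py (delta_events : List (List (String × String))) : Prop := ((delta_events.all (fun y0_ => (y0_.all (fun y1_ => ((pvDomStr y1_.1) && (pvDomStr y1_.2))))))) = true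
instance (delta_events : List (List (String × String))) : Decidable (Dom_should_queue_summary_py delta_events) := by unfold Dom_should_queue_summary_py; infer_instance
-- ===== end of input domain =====

-- B replaces A's three comprehensions + join/lower of a combined string by a single fold over
-- delta_events accumulating the char count and two per-row term-hit flags (objective: alternative, same cost).


-- shared literal constants (the two term tuples of the Python source)
def pvExplicitTerms : List String := ["记住", "remember", "forget", "update memory", "更新记忆"]
def pvInferenceTerms : List String := ["决定", "偏好", "约束", "todo", "下次继续", "失败结论", "next step", "failed"]

-- ===== PORT A =====
def should_queue_summary_py (delta_events : List (List (String × String))) : Bool :=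
  if delta_events = [] then false
  else
    let event_count : Int := PySem.List.len delta_events
    let char_count : Int := (delta_events.map (fun row =>
        PySem.Str.len (PySem.Dict.getD ⟨row⟩ "user_message_delta" "") +
        PySem.Str.len (PySem.Dict.getD ⟨row⟩ "assistant_message_delta" ""))).sum
    let combined : String := PySem.Str.lower (PySem.Str.join "\n"
        (((delta_events.map (fun row => PySem.Dict.getD ⟨row⟩ "user_message_delta" "")) ++
          (delta_events.map (fun row => PySem.Dict.getD ⟨row⟩ "assistant_message_delta" ""))).filter
            (fun s => decide (s ≠ ""))))
    if pvExplicitTerms.any (fun t => PySem.Str.isIn t combined) then true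
    else if event_count ≥ 4 then true
    else if char_count ≥ 1200 then true
    else pvInferenceTerms.any (fun t => PySem.Str.isIn t combined)

-- ===== PORT B =====
-- one loop iteration of Source B: add both message lengths, OR the two term-hit flags
def pvLenSum (row : List (String × String)) : Int :=
  PySem.Str.len (PySem.Dict.getD ⟨row⟩ "user_message_delta" "") +
  PySem.Str.len (PySem.Dict.getD ⟨row⟩ "assistant_message_delta" "")

def pvHit (terms : List String) (row : List (String × String)) : Bool :=
  terms.any (fun t =>
    PySem.Str.isIn t (PySem.Str.lower (PySem.Dict.getD ⟨row⟩ "user_message_delta" "")) ||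
    PySem.Str.isIn t (PySem.Str.lower (PySem.Dict.getD ⟨row⟩ "assistant_message_delta" "")))

def pvAltStep (acc : Int × Bool × Bool) (row : List (String × String)) : Int × Bool × Bool :=
  (acc.1 + pvLenSum row, acc.2.1 || pvHit pvExplicitTerms row, acc.2.2 || pvHit pvInferenceTerms row)

def should_queue_summary_py_alt (delta_events : List (List (String × String))) : Bool :=
  match delta_events with
  | [] => false
  | _ :: _ =>
    let r := delta_events.foldl pvAltStep (0, false, false)
    r.2.1 || decide (PySem.List.len delta_events ≥ 4) || decide (r.1 ≥ 1200) || r.2.2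

-- ===== PRECONDITION & SPEC =====
def Spec_should_queue_summary_py (delta_events : List (List (String × String))) (out : Bool) : Prop := out = should_queue_summary_py_alt delta_events
instance (delta_events : List (List (String × String))) (out : Bool) : Decidable (Spec_should_queue_summary_py delta_events out) := by unfold Spec_should_queue_summary_py; infer_instance

-- ===== CLAIM (what is proved, stated in full; the proofs are below) =====
def Claim_equal_should_queue_summary_py : Prop := ∀ (delta_events : List (List (String × String))), Dom_should_queue_summary_py delta_events → Spec_should_queue_summary_py delta_events (should_queue_summary_py delta_events)

-- ===== LEMMAS AND PROOFS =====

-- a pattern without c is an infix of `a ++ c :: b` iff it is an infix of a or of b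
lemma pv_infix_append_cons_iff {t a b : List Char} {c : Char} (hc : c ∉ t) :
    t <:+: a ++ c :: b ↔ (t <:+: a ∨ t <:+: b) := by
  constructor
  · rintro ⟨pre, suf, heq⟩
    by_cases h1 : pre.length + t.length ≤ a.length
    · left
      have hpt : pre ++ t <+: a ++ c :: b := ⟨suf, by simpa [List.append_assoc] using heq⟩
      have hpa : pre ++ t <+: a :=
        List.prefix_of_prefix_length_le hpt (List.prefix_append a (c :: b)) (by simp; omega)
      exact List.IsInfix.trans ⟨pre, [], by simp⟩ hpa.isInfix
    · by_cases h2 : a.length < pre.length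
      · right
        have hts : t ++ suf <:+ a ++ c :: b := ⟨pre, by simpa [List.append_assoc] using heq⟩
        have hb : b <:+ a ++ c :: b := ⟨a ++ [c], by simp⟩
        have hlen : (t ++ suf).length ≤ b.length := by
          have := congrArg List.length heq
          simp at this ⊢
          omega
        have := List.suffix_of_suffix_length_le hts hb hlen
        exact (List.IsInfix.trans ⟨[], suf, by simp⟩ this.isInfix)
      · exfalso
        simp only [not_le, not_lt] at h1 h2
        have hidx1 : a.length - pre.length < t.length := by omega
        have heq' : pre ++ (t ++ suf) = a ++ c :: b := by simpa [List.append_assoc] using heq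
        have hlt : a.length < (pre ++ (t ++ suf)).length := by
          rw [heq']; simp
        have e1 : (pre ++ (t ++ suf))[a.length]'hlt = c := by
          rw [List.getElem_of_eq heq' hlt, List.getElem_append_right (le_refl a.length)]
          simp
        have e3 : (pre ++ (t ++ suf))[a.length]'hlt = t[a.length - pre.length]'hidx1 := by
          rw [List.getElem_append_right h2, List.getElem_append_left hidx1]
        exact hc (e1 ▸ e3 ▸ List.getElem_mem hidx1)
  · rintro (⟨p, s, heq⟩ | ⟨p, s, heq⟩)
    · exact ⟨p, s ++ c :: b, by rw [← List.append_assoc, heq]⟩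
    · exact ⟨a ++ c :: p, s, by simp [← heq]⟩
-- a newline-free nonempty pattern is in the "\n"-join iff it is in some segment
lemma pv_infix_join_iff (t : List Char) (hc : ('\n' : Char) ∉ t) (ht : t ≠ []) :
    ∀ segs : List (List Char), t <:+: PySem.Chars.join ['\n'] segs ↔ ∃ s ∈ segs, t <:+: s := by
  intro segs
  induction segs with
  | nil => simp [PySem.Chars.join_nil, List.infix_nil, ht]
  | cons s rest ih =>
    cases rest with
    | nil => simp [PySem.Chars.join_singleton]
    | cons q rest' =>
      rw [PySem.Chars.join_cons_cons]
      have : s ++ ['\n'] ++ PySem.Chars.join ['\n'] (q :: rest')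
          = s ++ '\n' :: PySem.Chars.join ['\n'] (q :: rest') := by simp
      rw [this, pv_infix_append_cons_iff hc, ih]
      simp
-- lower commutes with the "\n"-join (lowerChar '\n' = '\n')
lemma pv_lower_join (L : List (List Char)) :
    PySem.Chars.lower (PySem.Chars.join ['\n'] L) = PySem.Chars.join ['\n'] (L.map PySem.Chars.lower) := by
  induction L with
  | nil => simp [PySem.Chars.join_nil, PySem.Chars.lower]
  | cons s rest ih =>
    cases rest with
    | nil => simp [PySem.Chars.join_singleton]
    | cons q rest' =>
      rw [PySem.Chars.join_cons_cons, List.map_cons, List.map_cons, PySem.Chars.join_cons_cons,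
        ← List.map_cons]
      simp only [PySem.Chars.lower, List.map_append] at ih ⊢
      rw [ih]
      rfl

-- a term is in A's lowered, filtered, joined string iff it is in the lowering of some segment
lemma pv_isIn_joined (t : String) (hc : ('\n' : Char) ∉ t.toList) (ht : t.toList ≠ []) (segs : List String) :
    PySem.Str.isIn t (PySem.Str.lower (PySem.Str.join "\n" (segs.filter (fun s => decide (s ≠ "")))))
      = segs.any (fun s => PySem.Str.isIn t (PySem.Str.lower s)) := by
  rw [Bool.eq_iff_iff, PySem.Str.isIn_iff_infix, PySem.Str.toList_lower, PySem.Str.toList_join]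
  have hnl : "\n".toList = ['\n'] := by decide
  rw [hnl, pv_lower_join, pv_infix_join_iff t.toList hc ht]
  constructor
  · rintro ⟨cs, hcs, hinf⟩
    rw [List.map_map] at hcs
    obtain ⟨s0, hs0, rfl⟩ := List.mem_map.mp hcs
    obtain ⟨hs0m, -⟩ := List.mem_filter.mp hs0
    simp only [List.any_eq_true, PySem.Str.isIn_iff_infix, PySem.Str.toList_lower]
    exact ⟨s0, hs0m, hinf⟩
  · intro h
    simp only [List.any_eq_true, PySem.Str.isIn_iff_infix, PySem.Str.toList_lower] at h
    obtain ⟨s0, hs0, hinf⟩ := h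
    refine ⟨PySem.Chars.lower s0.toList, ?_, hinf⟩
    rw [List.map_map]
    refine List.mem_map.mpr ⟨s0, List.mem_filter.mpr ⟨hs0, ?_⟩, rfl⟩
    refine decide_eq_true ?_
    intro he
    rw [he] at hinf
    simp only [String.toList_empty, PySem.Chars.lower, List.map_nil] at hinf
    exact ht (List.infix_nil.mp hinf)

-- every term of both tuples is nonempty and newline-free
lemma pv_terms_ok : ∀ t ∈ pvExplicitTerms ++ pvInferenceTerms, ('\n' : Char) ∉ t.toList ∧ t.toList ≠ [] := by decide

-- A's "any term in combined" equals B's "any row hit" for either term list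
lemma pv_any_terms (de : List (List (String × String))) (terms : List String)
    (hterms : ∀ t ∈ terms, ('\n' : Char) ∉ t.toList ∧ t.toList ≠ []) :
    terms.any (fun t => PySem.Str.isIn t (PySem.Str.lower (PySem.Str.join "\n"
        (((de.map (fun row => PySem.Dict.getD ⟨row⟩ "user_message_delta" "")) ++
          (de.map (fun row => PySem.Dict.getD ⟨row⟩ "assistant_message_delta" ""))).filter
            (fun s => decide (s ≠ ""))))))
      = de.any (pvHit terms) := by
  rw [Bool.eq_iff_iff]
  simp only [List.any_eq_true]
  constructor
  · rintro ⟨t, htm, hin⟩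
    obtain ⟨hc, hne⟩ := hterms t htm
    rw [pv_isIn_joined t hc hne] at hin
    simp only [List.any_append, List.any_map, Bool.or_eq_true, List.any_eq_true,
      Function.comp_apply] at hin
    rcases hin with ⟨row, hrow, h⟩ | ⟨row, hrow, h⟩
    · exact ⟨row, hrow, by
        simp only [pvHit, List.any_eq_true, Bool.or_eq_true]
        exact ⟨t, htm, Or.inl h⟩⟩
    · exact ⟨row, hrow, by
        simp only [pvHit, List.any_eq_true, Bool.or_eq_true]
        exact ⟨t, htm, Or.inr h⟩⟩
  · rintro ⟨row, hrow, hhit⟩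
    simp only [pvHit, List.any_eq_true, Bool.or_eq_true] at hhit
    obtain ⟨t, htm, h⟩ := hhit
    obtain ⟨hc, hne⟩ := hterms t htm
    refine ⟨t, htm, ?_⟩
    rw [pv_isIn_joined t hc hne]
    simp only [List.any_append, List.any_map, Bool.or_eq_true, List.any_eq_true,
      Function.comp_apply]
    rcases h with h | h
    · exact Or.inl ⟨row, hrow, h⟩
    · exact Or.inr ⟨row, hrow, h⟩

-- characterisation of B's fold
lemma pv_fold_spec (de : List (List (String × String))) :
    ∀ (c : Int) (e i : Bool),
      de.foldl pvAltStep (c, e, i)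
        = (c + (de.map pvLenSum).sum, e || de.any (pvHit pvExplicitTerms), i || de.any (pvHit pvInferenceTerms)) := by
  induction de with
  | nil => simp
  | cons row rest ih =>
    intro c e i
    simp only [List.foldl_cons, pvAltStep, ih, List.map_cons, List.sum_cons, List.any_cons]
    refine congrArg₂ _ (by ring) (congrArg₂ _ ?_ ?_) <;> cases e <;> cases i <;>
      cases pvHit pvExplicitTerms row <;> cases pvHit pvInferenceTerms row <;> simp

-- ===== VERDICT (by name: the statement is the Claim_ definition above) =====
theorem should_queue_summary_py_spec : Claim_equal_should_queue_summary_py := by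
  intro de _
  unfold Spec_should_queue_summary_py
  cases de with
  | nil => rfl
  | cons r rest =>
    have hE := pv_any_terms (r :: rest) pvExplicitTerms
      (fun t ht => pv_terms_ok t (List.mem_append.mpr (Or.inl ht)))
    have hI := pv_any_terms (r :: rest) pvInferenceTerms
      (fun t ht => pv_terms_ok t (List.mem_append.mpr (Or.inr ht)))
    simp only [should_queue_summary_py, should_queue_summary_py_alt, pv_fold_spec,
      Bool.false_or, zero_add, hE, hI, if_neg (List.cons_ne_nil r rest)]
    have hmap : ((r :: rest).map (fun row =>
        PySem.Str.len (PySem.Dict.getD ⟨row⟩ "user_message_delta" "") +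
        PySem.Str.len (PySem.Dict.getD ⟨row⟩ "assistant_message_delta" ""))) = (r :: rest).map pvLenSum := rfl
    rw [hmap]
    cases hval : (r :: rest).any (pvHit pvExplicitTerms) <;>
      cases hval2 : (r :: rest).any (pvHit pvInferenceTerms) <;>
      split_ifs <;> simp_all
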